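-- pv_equiv track=rewrite | github.com/SurajNate/Everything-About-AI | style_config.py | calculate_grid_layout
-- ===== SOURCE A (Python) =====
-- from typing import List, Tuple, Dict
--
-- def calculate_grid_layout(num_panels: int, panel_size: Tuple[int, int], spacing: int) -> List[Tuple[int, int]]:
--     """Calculate positions for a grid layout"""
--     positions = []
--     max_cols = min(num_panels, 3)  # Maximum 3 panels per row
--     rows = (num_panels + max_cols - 1) // max_cols
--
--     for i in range(num_panels):
--         row = i // max_cols
--         col = i % max_cols
--         x = col * (panel_size[0] + spacing)
--         y = row * (panel_size[1] + spacing)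
--         positions.append((x, y))
--
--     return positions
-- ===== SOURCE B (Python) =====
-- def calculate_grid_layout(num_panels, panel_size, spacing):
--     """Calculate positions for a grid layout (row-by-row construction)."""
--     max_cols = min(num_panels, 3)  # Maximum 3 panels per row
--     full_rows, rem = divmod(num_panels, max_cols)
--     step_x = panel_size[0] + spacing
--     step_y = panel_size[1] + spacing
--     positions = [(c * step_x, r * step_y)
--                  for r in range(full_rows) for c in range(max_cols)]
--     positions += [(c * step_x, full_rows * step_y) for c in range(rem)]
--     return positions
-- ===== Notes on version B (the rewrite author's own statement) =====
-- stated objective: alternative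
-- what changed: B replaces A's per-index div/mod pass with a divmod-once row-by-row construction: full rows are emitted by a nested row/column comprehension and the partial last row separately, so no per-element division remains.
import Mathlib
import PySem

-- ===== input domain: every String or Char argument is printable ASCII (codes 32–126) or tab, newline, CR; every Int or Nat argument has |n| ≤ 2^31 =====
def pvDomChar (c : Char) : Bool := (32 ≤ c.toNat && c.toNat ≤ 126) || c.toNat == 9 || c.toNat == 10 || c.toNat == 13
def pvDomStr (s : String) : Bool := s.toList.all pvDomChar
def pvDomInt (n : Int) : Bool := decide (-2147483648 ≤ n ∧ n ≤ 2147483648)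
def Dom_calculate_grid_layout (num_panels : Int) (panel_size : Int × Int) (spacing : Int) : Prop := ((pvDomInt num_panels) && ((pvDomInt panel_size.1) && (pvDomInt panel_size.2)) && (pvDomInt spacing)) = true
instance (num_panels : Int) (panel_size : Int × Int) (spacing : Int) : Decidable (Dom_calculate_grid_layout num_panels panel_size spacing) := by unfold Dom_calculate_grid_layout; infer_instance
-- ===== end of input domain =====

-- B builds the grid row by row (one divmod, full rows then the partial row) instead of
-- A's per-index div/mod pass; same values, alternative decomposition.


-- ===== PORT A =====
def calculate_grid_layout (num_panels : Int) (panel_size : Int × Int) (spacing : Int) : List (Int × Int) :=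
  let max_cols := min num_panels 3
  -- A computes `rows` and never uses it; '//' raises ZeroDivisionError when max_cols = 0 (excluded by Pre_)
  let _rows := PySem.Int.floordiv (num_panels + max_cols - 1) max_cols
  (PySem.List.pyRange 0 num_panels 1).foldl
    (fun positions i =>
      let row := PySem.Int.floordiv i max_cols
      let col := PySem.Int.mod i max_cols
      let x := col * (panel_size.1 + spacing)
      let y := row * (panel_size.2 + spacing)
      positions ++ [(x, y)]) []

-- ===== PORT B =====
def calculate_grid_layout_alt (num_panels : Int) (panel_size : Int × Int) (spacing : Int) : List (Int × Int) :=
  let max_cols := min num_panels 3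
  match PySem.Int.divmod? num_panels max_cols with
  | none => []  -- Python's divmod raises ZeroDivisionError here (excluded by Pre_)
  | some (full_rows, rem) =>
    let step_x := panel_size.1 + spacing
    let step_y := panel_size.2 + spacing
    ((PySem.List.pyRange 0 full_rows 1).flatMap fun r =>
        (PySem.List.pyRange 0 max_cols 1).map fun c => (c * step_x, r * step_y))
    ++ (PySem.List.pyRange 0 rem 1).map fun c => (c * step_x, full_rows * step_y)

-- ===== PRECONDITION & SPEC =====
-- Pre_ excludes only num_panels = 0, where both Pythons raise ZeroDivisionError.
def Pre_calculate_grid_layout (num_panels : Int) (panel_size : Int × Int) (spacing : Int) : Prop := num_panels ≠ 0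
instance (num_panels : Int) (panel_size : Int × Int) (spacing : Int) : Decidable (Pre_calculate_grid_layout num_panels panel_size spacing) := by unfold Pre_calculate_grid_layout; infer_instance
def pvWitness_calculate_grid_layout : Int × (Int × Int) × Int := (5, (10, 20), 2)

def Spec_calculate_grid_layout (num_panels : Int) (panel_size : Int × Int) (spacing : Int) (out : List (Int × Int)) : Prop := out = calculate_grid_layout_alt num_panels panel_size spacing
instance (num_panels : Int) (panel_size : Int × Int) (spacing : Int) (out : List (Int × Int)) : Decidable (Spec_calculate_grid_layout num_panels panel_size spacing out) := by unfold Spec_calculate_grid_layout; infer_instance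

-- ===== CLAIM (what is proved, stated in full; the proofs are below) =====
def Claim_equal_calculate_grid_layout : Prop := ∀ (num_panels : Int) (panel_size : Int × Int) (spacing : Int), Dom_calculate_grid_layout num_panels panel_size spacing → Pre_calculate_grid_layout num_panels panel_size spacing → Spec_calculate_grid_layout num_panels panel_size spacing (calculate_grid_layout num_panels panel_size spacing)

-- ===== LEMMAS AND PROOFS =====

-- Full blocks: indices [0, Q*M) enumerated by index equal Q full rows of M columns.
theorem pv_blocks (M Q : Nat) (hM : 0 < M) (sx sy : Int) :
    (List.range (M * Q)).map (fun k => ((↑(k % M) : Int) * sx, (↑(k / M) : Int) * sy))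
      = (List.range Q).flatMap (fun (r : Nat) => (List.range M).map (fun (c : Nat) => ((c : Int) * sx, (r : Int) * sy))) := by
  induction Q with
  | zero => simp
  | succ Q ih =>
    rw [Nat.mul_succ, List.range_add, List.map_append, ih, List.range_succ, List.flatMap_append,
      List.map_map]
    congr 1
    simp only [List.flatMap_singleton]
    apply List.map_congr_left
    intro c hc
    rw [List.mem_range] at hc
    have hmod : (M * Q + c) % M = c % M := Nat.mul_add_mod M Q c
    have hdiv : (M * Q + c) / M = Q := by
      rw [Nat.mul_add_div hM, Nat.div_eq_of_lt hc, Nat.add_zero]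
    simp [Function.comp, hmod, hdiv, Nat.mod_eq_of_lt hc]

-- Full blocks plus a partial last row of R < M elements.
theorem pv_grid (M Q R : Nat) (hM : 0 < M) (hR : R < M) (sx sy : Int) :
    (List.range (M * Q + R)).map (fun k => ((↑(k % M) : Int) * sx, (↑(k / M) : Int) * sy))
      = (List.range Q).flatMap (fun (r : Nat) => (List.range M).map (fun (c : Nat) => ((c : Int) * sx, (r : Int) * sy)))
        ++ (List.range R).map (fun (c : Nat) => ((c : Int) * sx, (Q : Int) * sy)) := by
  rw [List.range_add, List.map_append, pv_blocks M Q hM, List.map_map]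
  congr 1
  apply List.map_congr_left
  intro c hc
  rw [List.mem_range] at hc
  have hcM : c < M := lt_trans hc hR
  have hmod : (M * Q + c) % M = c % M := Nat.mul_add_mod M Q c
  have hdiv : (M * Q + c) / M = Q := by
    rw [Nat.mul_add_div hM, Nat.div_eq_of_lt hcM, Nat.add_zero]
  simp [Function.comp, hmod, hdiv, Nat.mod_eq_of_lt hcM]

-- ===== VERDICT (by name: the statement is the Claim_ definition above) =====
theorem calculate_grid_layout_spec : Claim_equal_calculate_grid_layout := by
  intro n ps sp _ hn
  unfold Spec_calculate_grid_layout calculate_grid_layout calculate_grid_layout_alt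
  simp only []
  rcases lt_or_gt_of_ne hn with hneg | hpos
  · -- n < 0 : both sides are empty
    have hm : min n 3 = n := min_eq_left (by omega)
    rw [hm]
    rw [PySem.Int.divmod?]
    simp only [if_neg hn]
    have hrem : n.fmod n = 0 := by
      have := (PySem.Int.mod_eq_zero_iff_dvd n n).mpr dvd_rfl
      simpa [PySem.Int.mod] using this
    rw [hrem]
    rw [PySem.List.pyRange_one_eq_nil (by omega : n ≤ 0),
        PySem.List.pyRange_one_eq_nil (le_refl (0 : Int))]
    simp
  · -- n > 0
    set m : Int := min n 3 with hmdef
    have hm0 : 0 < m := by omega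
    have hmn : m ≠ 0 := by omega
    -- Nat views
    set N : Nat := n.toNat with hN
    set M : Nat := m.toNat with hM
    have hnN : n = (N : Int) := by omega
    have hmM : m = (M : Int) := by omega
    have hMpos : 0 < M := by omega
    -- A's side: fold = map over range
    rw [PySem.List.foldl_append_singleton_eq_map, List.nil_append]
    -- divmod
    rw [PySem.Int.divmod?]
    simp only [if_neg hmn]
    have hfd : n.fdiv m = ((N / M : Nat) : Int) := by
      have := PySem.Int.floordiv_natCast N M
      rw [← hnN, ← hmM] at this
      simpa [PySem.Int.floordiv] using this
    have hfm : n.fmod m = ((N % M : Nat) : Int) := by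
      have := PySem.Int.mod_natCast N M
      rw [← hnN, ← hmM] at this
      simpa [PySem.Int.mod] using this
    rw [hfd, hfm]
    rw [hnN, hmM]
    rw [PySem.List.pyRange_zero_nat N, PySem.List.pyRange_zero_nat (N / M),
        PySem.List.pyRange_zero_nat M, PySem.List.pyRange_zero_nat (N % M)]
    simp only [List.map_map, List.flatMap_map]
    have hNsplit : N = M * (N / M) + N % M := (Nat.div_add_mod N M).symm
    have key := pv_grid M (N / M) (N % M) hMpos (Nat.mod_lt N hMpos)
      (ps.1 + sp) (ps.2 + sp)
    rw [← hNsplit] at key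
    simp only [Function.comp_def, PySem.Int.mod_natCast, PySem.Int.floordiv_natCast]
    exact key
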